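-- pv_equiv track=rewrite | github.com/miris032/submission_IJCAI | src/drift_detection.py | _slidSHAPPos_to_tsPos
-- ===== SOURCE A (Python) =====
-- def _slidSHAPPos_to_tsPos(slidSHAPPred, window_width, overlap):
--     """
--     Given a series of detected drift positions on the slidSHAP series, map them back to the positions in the original
--     time series, based on the last timestamp in the sliding window corresponding to each slidSHAP value.
--     slidSHAPPred is the binary-encoded slidSHAP predictions. 0 no drift, 1 drift.
--     """
--     ts_pred = [0 for _ in range(window_width + overlap * (len(slidSHAPPred) - 1))]
--     ts_drift_pos = []
--     for idx, slidSHAP in enumerate(slidSHAPPred):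
--         if slidSHAP == 1:
--             ts_drift_pos.append(window_width + idx * overlap - 1)
--     for pos in ts_drift_pos:
--         ts_pred[pos] = 1
--     return ts_pred
-- ===== SOURCE B (Python) =====
-- def _slidSHAPPos_to_tsPos(slidSHAPPred, window_width, overlap):
--     L = window_width + overlap * (len(slidSHAPPred) - 1)
--     positions = sorted({window_width + idx * overlap - 1
--                         for idx, v in enumerate(slidSHAPPred)
--                         if v == 1 and window_width + idx * overlap - 1 >= 0})
--     out = []
--     prev = 0
--     for p in positions:
--         out.extend([0] * (p - prev))
--         out.append(1)
--         prev = p + 1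
--     out.extend([0] * (L - prev))
--     return out
-- ===== Notes on version B (the rewrite author's own statement) =====
-- stated objective: alternative
-- what changed: Replaces A's allocate-zeros-then-scatter-write with run-length construction: the drift positions are deduplicated, sorted and kept in range, and the output is built by concatenating a zero-run and a [1] per drift position plus a zero tail, so no array is preallocated and no index is written into.
-- intended difference: On inputs where some flagged window maps to a negative timeseries position (window_width + idx*overlap - 1 < 0) whose wrapped landing spot is not itself a flagged window's position, A wraps the write around (Python negative indexing) and marks a position counted from the end, while B marks only in-range positions; the wraparound is an accident of Python list indexing, not the intended mapping. — e.g. on _slidSHAPPos_to_tsPos([1, 0], 0, 1): A returns [1], B returns [0]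
import Mathlib
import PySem

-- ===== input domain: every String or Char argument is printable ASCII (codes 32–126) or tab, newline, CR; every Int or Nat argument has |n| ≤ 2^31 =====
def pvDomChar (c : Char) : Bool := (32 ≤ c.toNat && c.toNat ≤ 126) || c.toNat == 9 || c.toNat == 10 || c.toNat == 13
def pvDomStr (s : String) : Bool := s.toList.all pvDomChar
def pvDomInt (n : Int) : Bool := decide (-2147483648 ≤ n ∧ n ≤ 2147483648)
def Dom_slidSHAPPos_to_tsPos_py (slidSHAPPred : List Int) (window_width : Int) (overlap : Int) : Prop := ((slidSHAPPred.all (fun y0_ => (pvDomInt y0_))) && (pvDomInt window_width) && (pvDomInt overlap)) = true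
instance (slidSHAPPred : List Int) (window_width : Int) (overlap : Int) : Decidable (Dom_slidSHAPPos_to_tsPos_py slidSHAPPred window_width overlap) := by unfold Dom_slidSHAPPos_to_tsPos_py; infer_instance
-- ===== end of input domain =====

-- B replaces A's allocate-zeros-then-scatter-write with run-length construction over the sorted
-- deduplicated in-range drift positions (alternative, not faster); on windows mapping to a negative
-- position A's write wraps around (Python negative indexing) while B marks only in-range
-- positions — stated below as D_.

-- ===== PORT A =====
def slidSHAPPos_to_tsPos_py (slidSHAPPred : List Int) (window_width : Int) (overlap : Int) : List Int :=
  let ts_pred : List Int :=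
    (PySem.List.pyRange 0 (window_width + overlap * ((slidSHAPPred.length : Int) - 1)) 1).map (fun _ => 0)
  let ts_drift_pos : List Int :=
    (PySem.List.enumerate slidSHAPPred 0).foldl
      (fun acc p => if p.2 == 1 then acc ++ [window_width + p.1 * overlap - 1] else acc) []
  -- ts_pred[pos] = 1; Python raises IndexError out of [-len, len) — excluded by Pre_
  ts_drift_pos.foldl (fun acc pos => PySem.List.pySetD acc pos 1) ts_pred

-- ===== PORT B =====
def slidSHAPPos_to_tsPos_py_alt (slidSHAPPred : List Int) (window_width : Int) (overlap : Int) : List Int :=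
  let L := window_width + overlap * ((slidSHAPPred.length : Int) - 1)
  -- sorted({… for idx, v in enumerate(…) if v == 1 and … >= 0})
  let positions : List Int :=
    PySem.List.sorted
      (PySem.Set.ofList (((PySem.List.enumerate slidSHAPPred 0).filter
          (fun p => p.2 == 1 && decide (0 ≤ window_width + p.1 * overlap - 1))).map
        (fun p => window_width + p.1 * overlap - 1)))
      (fun x => x) false
  -- out/prev accumulator loop: zero-run, then a 1, per drift position
  let st := positions.foldl
    (fun (st : List Int × Int) p =>
      (st.1 ++ List.replicate (p - st.2).toNat 0 ++ [1], p + 1)) ([], 0)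
  st.1 ++ List.replicate (L - st.2).toNat 0

-- ===== PRECONDITION & SPEC =====
-- Pre_ excludes exactly the inputs on which A raises IndexError: some flagged window maps to a
-- position outside [-len, len) of the allocated output list.
def Pre_slidSHAPPos_to_tsPos_py (slidSHAPPred : List Int) (window_width : Int) (overlap : Int) : Prop :=
  ∀ p ∈ PySem.List.enumerate slidSHAPPred 0, p.2 = 1 →
    -(max (window_width + overlap * ((slidSHAPPred.length : Int) - 1)) 0) ≤ window_width + p.1 * overlap - 1 ∧
    window_width + p.1 * overlap - 1 < max (window_width + overlap * ((slidSHAPPred.length : Int) - 1)) 0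
instance (slidSHAPPred : List Int) (window_width : Int) (overlap : Int) : Decidable (Pre_slidSHAPPos_to_tsPos_py slidSHAPPred window_width overlap) := by unfold Pre_slidSHAPPos_to_tsPos_py; infer_instance

def pvWitness_slidSHAPPos_to_tsPos_py : List Int × Int × Int := ([0, 1], 3, 2)

-- On inputs where some flagged window maps to a negative timeseries position
-- (window_width + idx*overlap - 1 < 0, still within [-L,0)) whose wrapped landing spot
-- len + position is not itself the position of a flagged window, A wraps the write around and
-- marks a position counted from the end of the output, while B marks only in-range
-- positions; the wraparound is an accident of Python list indexing, not the intended mapping.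
def D_slidSHAPPos_to_tsPos_py (slidSHAPPred : List Int) (window_width : Int) (overlap : Int) : Prop :=
  ∃ i ∈ slidSHAPPred.zipIdx, i.1 = 1 ∧ window_width + i.2 * overlap < 1 ∧
    ∀ j ∈ slidSHAPPred.zipIdx, j.1 = 1 →
      (j.2 - i.2 : Int) * overlap ≠ window_width + overlap * (slidSHAPPred.length - 1)
instance (slidSHAPPred : List Int) (window_width : Int) (overlap : Int) : Decidable (D_slidSHAPPos_to_tsPos_py slidSHAPPred window_width overlap) := by unfold D_slidSHAPPos_to_tsPos_py; infer_instance

def Spec_slidSHAPPos_to_tsPos_py (slidSHAPPred : List Int) (window_width : Int) (overlap : Int) (out : List Int) : Prop := ¬ D_slidSHAPPos_to_tsPos_py slidSHAPPred window_width overlap → out = slidSHAPPos_to_tsPos_py_alt slidSHAPPred window_width overlap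
instance (slidSHAPPred : List Int) (window_width : Int) (overlap : Int) (out : List Int) : Decidable (Spec_slidSHAPPos_to_tsPos_py slidSHAPPred window_width overlap out) := by unfold Spec_slidSHAPPos_to_tsPos_py; infer_instance

def pvDiffWitness_slidSHAPPos_to_tsPos_py : List Int × Int × Int := ([1, 0], 0, 1)
def pvDiffWitnessOut_slidSHAPPos_to_tsPos_py : (List Int) × (List Int) := ([1], [0])

-- ===== CLAIM (what is proved, stated in full; the proofs are below) =====
def Claim_unchanged_slidSHAPPos_to_tsPos_py : Prop := ∀ (slidSHAPPred : List Int) (window_width : Int) (overlap : Int), Dom_slidSHAPPos_to_tsPos_py slidSHAPPred window_width overlap → Pre_slidSHAPPos_to_tsPos_py slidSHAPPred window_width overlap → Spec_slidSHAPPos_to_tsPos_py slidSHAPPred window_width overlap (slidSHAPPos_to_tsPos_py slidSHAPPred window_width overlap)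
def Claim_changed_slidSHAPPos_to_tsPos_py : Prop := Dom_slidSHAPPos_to_tsPos_py (pvDiffWitness_slidSHAPPos_to_tsPos_py.1) (pvDiffWitness_slidSHAPPos_to_tsPos_py.2.1) (pvDiffWitness_slidSHAPPos_to_tsPos_py.2.2) ∧ Pre_slidSHAPPos_to_tsPos_py (pvDiffWitness_slidSHAPPos_to_tsPos_py.1) (pvDiffWitness_slidSHAPPos_to_tsPos_py.2.1) (pvDiffWitness_slidSHAPPos_to_tsPos_py.2.2) ∧ D_slidSHAPPos_to_tsPos_py (pvDiffWitness_slidSHAPPos_to_tsPos_py.1) (pvDiffWitness_slidSHAPPos_to_tsPos_py.2.1) (pvDiffWitness_slidSHAPPos_to_tsPos_py.2.2) ∧ slidSHAPPos_to_tsPos_py (pvDiffWitness_slidSHAPPos_to_tsPos_py.1) (pvDiffWitness_slidSHAPPos_to_tsPos_py.2.1) (pvDiffWitness_slidSHAPPos_to_tsPos_py.2.2) = pvDiffWitnessOut_slidSHAPPos_to_tsPos_py.1 ∧ slidSHAPPos_to_tsPos_py_alt (pvDiffWitness_slidSHAPPos_to_tsPos_py.1) (pvDiffWitness_slidSHAPPos_to_tsPos_py.2.1)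 (pvDiffWitness_slidSHAPPos_to_tsPos_py.2.2) = pvDiffWitnessOut_slidSHAPPos_to_tsPos_py.2 ∧ pvDiffWitnessOut_slidSHAPPos_to_tsPos_py.1 ≠ pvDiffWitnessOut_slidSHAPPos_to_tsPos_py.2
def Claim_exact_slidSHAPPos_to_tsPos_py : Prop := ∀ (slidSHAPPred : List Int) (window_width : Int) (overlap : Int), Dom_slidSHAPPos_to_tsPos_py slidSHAPPred window_width overlap → Pre_slidSHAPPos_to_tsPos_py slidSHAPPred window_width overlap → D_slidSHAPPos_to_tsPos_py slidSHAPPred window_width overlap → slidSHAPPos_to_tsPos_py slidSHAPPred window_width overlap ≠ slidSHAPPos_to_tsPos_py_alt slidSHAPPred window_width overlap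

-- ===== LEMMAS AND PROOFS =====

-- D_ restated over enumerate, in the position/ wrap-target form the proofs use.
lemma pv_D_iff (s : List Int) (w ov : Int) :
    D_slidSHAPPos_to_tsPos_py s w ov ↔
      ∃ p ∈ PySem.List.enumerate s 0, p.2 = 1 ∧ w + p.1 * ov - 1 < 0 ∧
        ∀ q ∈ PySem.List.enumerate s 0, q.2 = 1 →
          w + q.1 * ov - 1 ≠ (w + ov * ((s.length : Int) - 1)) + (w + p.1 * ov - 1) := by
  unfold D_slidSHAPPos_to_tsPos_py
  simp only [PySem.List.enumerate_eq_zipIdx_map, zero_add]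
  constructor
  · rintro ⟨i, hi, h1, h2, h3⟩
    refine ⟨((i.2 : Int), i.1), List.mem_map.mpr ⟨i, hi, rfl⟩, h1, by linarith, ?_⟩
    rintro q hq hq1 hc
    obtain ⟨j, hj, rfl⟩ := List.mem_map.mp hq
    apply h3 j hj hq1
    rw [sub_mul]
    simp only at hc
    linarith
  · rintro ⟨p, hp, h1, h2, h3⟩
    obtain ⟨i, hi, rfl⟩ := List.mem_map.mp hp
    simp only at h1 h2 h3
    refine ⟨i, hi, h1, by linarith, ?_⟩
    rintro j hj hj1 hc
    apply h3 ((j.2 : Int), j.1) (List.mem_map.mpr ⟨j, hj, rfl⟩) hj1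
    rw [sub_mul] at hc
    simp only
    linarith

-- Python's wrapped write target: xs[p] = v writes at p if p ≥ 0, at len+p if p < 0.
def pvWrap (L p : Int) : Int := if p < 0 then L + p else p

lemma pv_pySetD_wrap (L : Int) (g : Int → Int) (p : Int) (h1 : -L ≤ p) (h2 : p < L) :
    PySem.List.pySetD ((PySem.List.pyRange 0 L 1).map g) p 1
      = (PySem.List.pyRange 0 L 1).map (fun i => if i = pvWrap L p then 1 else g i) := by
  have hL : (((PySem.List.pyRange 0 L 1).map g).length : Int) = L := by
    simp [PySem.List.length_pyRange_one]; omega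
  have hidx : PySem.List.pyIdx? ((PySem.List.pyRange 0 L 1).map g).length p
      = some (pvWrap L p).toNat := by
    unfold PySem.List.pyIdx? pvWrap
    by_cases hp : 0 ≤ p
    · rw [if_pos hp, if_pos (by omega), if_neg (by omega)]
    · rw [if_neg hp, if_pos (by omega), if_pos (by omega)]
      congr 1
      omega
  have hset : PySem.List.pySetD ((PySem.List.pyRange 0 L 1).map g) p 1
      = ((PySem.List.pyRange 0 L 1).map g).set (pvWrap L p).toNat 1 := by
    unfold PySem.List.pySetD PySem.List.pySet?
    rw [hidx]
    rfl
  have hw : 0 ≤ pvWrap L p ∧ pvWrap L p < L := by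
    unfold pvWrap; by_cases hp : p < 0 <;> simp [hp] <;> omega
  rw [hset]
  apply List.ext_getElem
  · simp
  · intro k hk1 hk2
    simp only [List.getElem_set, List.getElem_map, PySem.List.getElem_pyRange_one]
    simp only [List.length_set, List.length_map, PySem.List.length_pyRange_one] at hk1
    by_cases hkp : k = (pvWrap L p).toNat
    · have hkv : (0 : Int) + (k : Int) = pvWrap L p := by omega
      subst hkp
      simp
      intro hc
      exact absurd hc (by omega)
    · have hkv : ¬((0 : Int) + (k : Int) = pvWrap L p) := by omega
      rw [if_neg (fun hh => hkp hh.symm), if_neg hkv]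

lemma pv_scatter_eq (L : Int) (P : List Int) (g : Int → Int)
    (h : ∀ p ∈ P, -L ≤ p ∧ p < L) :
    P.foldl (fun acc pos => PySem.List.pySetD acc pos 1) ((PySem.List.pyRange 0 L 1).map g)
      = (PySem.List.pyRange 0 L 1).map (fun i => if ∃ p ∈ P, pvWrap L p = i then 1 else g i) := by
  induction P generalizing g with
  | nil => simp
  | cons p P' ih =>
    have hp := h p (by simp)
    rw [List.foldl_cons, pv_pySetD_wrap L g p hp.1 hp.2,
      ih _ (fun q hq => h q (List.mem_cons_of_mem _ hq))]
    congr 1; funext i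
    by_cases h1 : ∃ q ∈ P', pvWrap L q = i
    · rw [if_pos h1, if_pos ⟨h1.choose, List.mem_cons_of_mem _ h1.choose_spec.1, h1.choose_spec.2⟩]
    · by_cases h2 : i = pvWrap L p
      · rw [if_pos (⟨p, by simp, h2.symm⟩ : ∃ q ∈ p :: P', pvWrap L q = i)]
        simp [h2]
      · rw [if_neg h1, if_neg h2]
        rw [if_neg]
        rintro ⟨q, hq, hqi⟩
        rcases List.mem_cons.mp hq with rfl | hq'
        · exact h2 hqi.symm
        · exact h1 ⟨q, hq', hqi⟩

-- Run-length construction over a strictly increasing, in-range position list builds exactly the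
-- dense 0/1 indicator of the remaining range.
lemma pv_runbuild (ps : List Int) (prev L : Int) (acc : List Int)
    (hs : ps.Pairwise (· < ·)) (hlo : ∀ p ∈ ps, prev ≤ p) (hhi : ∀ p ∈ ps, p < L) :
    (ps.foldl (fun (st : List Int × Int) p =>
        (st.1 ++ List.replicate (p - st.2).toNat 0 ++ [1], p + 1)) (acc, prev)).1
      ++ List.replicate (L - (ps.foldl (fun (st : List Int × Int) p =>
        (st.1 ++ List.replicate (p - st.2).toNat 0 ++ [1], p + 1)) (acc, prev)).2).toNat 0
    = acc ++ (PySem.List.pyRange prev L 1).map (fun i => if i ∈ ps then 1 else 0) := by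
  induction ps generalizing acc prev with
  | nil =>
    simp only [List.foldl_nil, List.not_mem_nil, if_false]
    congr 1
    apply List.ext_getElem
    · simp [PySem.List.length_pyRange_one]
    · intro k hk1 hk2
      simp
  | cons p ps ih =>
    rcases List.pairwise_cons.mp hs with ⟨hplt, hs'⟩
    have hpp : prev ≤ p := hlo p (by simp)
    have hpL : p < L := hhi p (by simp)
    rw [List.foldl_cons]
    rw [show ((acc, prev).1 ++ List.replicate (p - (acc, prev).2).toNat 0 ++ [1], p + 1)
        = (acc ++ List.replicate (p - prev).toNat 0 ++ [1], p + 1) from rfl]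
    rw [ih (p + 1) (acc ++ List.replicate (p - prev).toNat 0 ++ [1]) hs'
        (fun q hq => by have := hplt q hq; omega)
        (fun q hq => hhi q (List.mem_cons_of_mem _ hq))]
    rw [PySem.List.pyRange_one_append prev (p + 1) L (by omega) (by omega),
        PySem.List.pyRange_one_succ_right (by omega)]
    have hzeros : (PySem.List.pyRange prev p 1).map
        (fun i => if i ∈ p :: ps then (1 : Int) else 0) = List.replicate (p - prev).toNat 0 := by
      apply List.ext_getElem
      · simp [PySem.List.length_pyRange_one]
      · intro k hk1 hk2
        simp only [List.getElem_map, PySem.List.getElem_pyRange_one, List.getElem_replicate]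
        simp only [List.length_map, PySem.List.length_pyRange_one] at hk1
        rw [if_neg]
        intro hmem
        rcases List.mem_cons.mp hmem with heq | hmem'
        · omega
        · have := hplt _ hmem'
          omega
    have hrest : (PySem.List.pyRange (p + 1) L 1).map
        (fun i => if i ∈ p :: ps then (1 : Int) else 0)
        = (PySem.List.pyRange (p + 1) L 1).map (fun i => if i ∈ ps then 1 else 0) := by
      apply List.map_congr_left
      intro i hi
      rw [PySem.List.mem_pyRange_one] at hi
      by_cases hmem : i ∈ ps
      · rw [if_pos (List.mem_cons_of_mem _ hmem), if_pos hmem]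
      · have hni : i ∉ p :: ps := by
          intro h
          rcases List.mem_cons.mp h with h' | h'
          · omega
          · exact hmem h'
        rw [if_neg hni, if_neg hmem]
    simp only [List.map_append, hzeros, hrest, List.map_cons]
    simp [List.append_assoc]

-- B's result, under Pre_: the dense indicator of the sorted in-range position list.
lemma pv_B_eq (s : List Int) (w ov : Int) (hPre : Pre_slidSHAPPos_to_tsPos_py s w ov) :
    slidSHAPPos_to_tsPos_py_alt s w ov
      = (PySem.List.pyRange 0 (w + ov * ((s.length : Int) - 1)) 1).map
          (fun i => if i ∈ PySem.List.sorted
              (PySem.Set.ofList (((PySem.List.enumerate s 0).filter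
                  (fun p => p.2 == 1 && decide (0 ≤ w + p.1 * ov - 1))).map
                (fun p => w + p.1 * ov - 1))) (fun x => x) false then 1 else 0) := by
  unfold slidSHAPPos_to_tsPos_py_alt
  set L := w + ov * ((s.length : Int) - 1) with hL
  set positions := PySem.List.sorted
      (PySem.Set.ofList (((PySem.List.enumerate s 0).filter
          (fun p => p.2 == 1 && decide (0 ≤ w + p.1 * ov - 1))).map
        (fun p => w + p.1 * ov - 1))) (fun x => x) false with hpos
  have hmem : ∀ q ∈ positions, 0 ≤ q ∧ q < L := by
    intro q hq
    rw [hpos, PySem.List.mem_sorted, PySem.Set.mem_ofList] at hq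
    simp only [List.mem_map, List.mem_filter, Bool.and_eq_true, beq_iff_eq,
      decide_eq_true_eq] at hq
    obtain ⟨p, ⟨hpe, hp1, hp0⟩, rfl⟩ := hq
    have := hPre p hpe hp1
    constructor <;> omega
  have hsorted : positions.Pairwise (· < ·) := by
    rw [hpos]
    exact PySem.List.sorted_ofList_pairwise_lt _
  exact pv_runbuild positions 0 L [] hsorted (fun q hq => (hmem q hq).1)
    (fun q hq => (hmem q hq).2)

theorem slidSHAPPos_to_tsPos_py_spec : Claim_unchanged_slidSHAPPos_to_tsPos_py := by
  intro pred w ov _hDom hPre hD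
  rw [pv_B_eq pred w ov hPre]
  unfold slidSHAPPos_to_tsPos_py
  simp only []
  set L := w + ov * ((pred.length : Int) - 1) with hL
  rw [PySem.List.foldl_append_if (fun p : Int × Int => p.2 == 1) (fun p : Int × Int => w + p.1 * ov - 1)]
  set P := ((PySem.List.enumerate pred 0).filter (fun p => p.2 == 1)).map
      (fun p => w + p.1 * ov - 1) with hP
  set positions := PySem.List.sorted
      (PySem.Set.ofList (((PySem.List.enumerate pred 0).filter
          (fun p => p.2 == 1 && decide (0 ≤ w + p.1 * ov - 1))).map
        (fun p => w + p.1 * ov - 1))) (fun x => x) false with hpos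
  have hmem : ∀ q ∈ P, ∃ p ∈ PySem.List.enumerate pred 0, p.2 = 1 ∧ q = w + p.1 * ov - 1 := by
    intro q hq
    rw [hP] at hq
    simp only [List.mem_map, List.mem_filter] at hq
    obtain ⟨p, ⟨hpe, hp1⟩, rfl⟩ := hq
    exact ⟨p, hpe, by simpa using hp1, rfl⟩
  have hbound : ∀ q ∈ P, -L ≤ q ∧ q < L := by
    intro q hq
    obtain ⟨p, hpe, hp1, rfl⟩ := hmem q hq
    have h1 := hPre p hpe hp1
    rcases h1 with ⟨hge, hlt⟩
    constructor <;> omega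
  have hposP : ∀ i : Int, 0 ≤ i → (i ∈ positions ↔ i ∈ P) := by
    intro i hi0
    rw [hpos, PySem.List.mem_sorted, PySem.Set.mem_ofList, hP]
    simp only [List.mem_map, List.mem_filter, Bool.and_eq_true, beq_iff_eq,
      decide_eq_true_eq]
    constructor
    · rintro ⟨p, ⟨hpe, hp1, _⟩, rfl⟩
      exact ⟨p, ⟨hpe, by simpa using hp1⟩, rfl⟩
    · rintro ⟨p, ⟨hpe, hp1⟩, rfl⟩
      exact ⟨p, ⟨hpe, by simpa using hp1, by omega⟩, rfl⟩
  rw [List.nil_append, pv_scatter_eq L P _ hbound]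
  apply List.map_congr_left
  intro i hi
  rw [PySem.List.mem_pyRange_one] at hi
  have hiP : (∃ p ∈ P, pvWrap L p = i) ↔ i ∈ P := by
    constructor
    · rintro ⟨p, hpP, hw⟩
      by_cases hneg : p < 0
      · -- wrapped write: i = L + p; ¬D_ provides a flagged window landing exactly there
        obtain ⟨q0, hq0e, hq01, rfl⟩ := hmem p hpP
        have hb := hPre q0 hq0e hq01
        have hnd : ∃ q ∈ PySem.List.enumerate pred 0, q.2 = 1 ∧
            w + q.1 * ov - 1 = L + (w + q0.1 * ov - 1) := by
          by_contra hno
          push Not at hno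
          exact hD ((pv_D_iff pred w ov).mpr ⟨q0, hq0e, hq01, hneg, fun q hq hq1 => hno q hq hq1⟩)
        obtain ⟨q, hqe, hq1, hqv⟩ := hnd
        have : w + q.1 * ov - 1 = i := by
          unfold pvWrap at hw
          rw [if_pos hneg] at hw
          omega
        rw [hP]
        refine List.mem_map.mpr ⟨q, List.mem_filter.mpr ⟨hqe, by simpa using hq1⟩, this⟩
      · unfold pvWrap at hw
        rw [if_neg hneg] at hw
        exact hw ▸ hpP
    · intro hiPm
      refine ⟨i, hiPm, ?_⟩
      unfold pvWrap
      rw [if_neg (by omega)]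
  by_cases hc : i ∈ P
  · rw [if_pos (hiP.mpr hc), if_pos ((hposP i hi.1).mpr hc)]
  · rw [if_neg (fun hh => hc (hiP.mp hh)), if_neg (fun hh => hc ((hposP i hi.1).mp hh))]

theorem slidSHAPPos_to_tsPos_py_tight : Claim_exact_slidSHAPPos_to_tsPos_py := by
  intro pred w ov _hDom hPre hD
  obtain ⟨p0, hp0e, hp01, hp0neg, hp0no⟩ := (pv_D_iff pred w ov).mp hD
  rw [pv_B_eq pred w ov hPre]
  unfold slidSHAPPos_to_tsPos_py
  simp only []
  set L := w + ov * ((pred.length : Int) - 1) with hL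
  rw [PySem.List.foldl_append_if (fun p : Int × Int => p.2 == 1) (fun p : Int × Int => w + p.1 * ov - 1)]
  set P := ((PySem.List.enumerate pred 0).filter (fun p => p.2 == 1)).map
      (fun p => w + p.1 * ov - 1) with hP
  set positions := PySem.List.sorted
      (PySem.Set.ofList (((PySem.List.enumerate pred 0).filter
          (fun p => p.2 == 1 && decide (0 ≤ w + p.1 * ov - 1))).map
        (fun p => w + p.1 * ov - 1))) (fun x => x) false with hpos
  have hmem : ∀ q ∈ P, ∃ p ∈ PySem.List.enumerate pred 0, p.2 = 1 ∧ q = w + p.1 * ov - 1 := by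
    intro q hq
    rw [hP] at hq
    simp only [List.mem_map, List.mem_filter] at hq
    obtain ⟨p, ⟨hpe, hp1⟩, rfl⟩ := hq
    exact ⟨p, hpe, by simpa using hp1, rfl⟩
  have hbound : ∀ q ∈ P, -L ≤ q ∧ q < L := by
    intro q hq
    obtain ⟨p, hpe, hp1, rfl⟩ := hmem q hq
    have h1 := hPre p hpe hp1
    rcases h1 with ⟨hge, hlt⟩
    constructor <;> omega
  rw [List.nil_append, pv_scatter_eq L P _ hbound]
  -- the two sides differ at index L + pos(p0)
  have hposb := hPre p0 hp0e hp01
  set t := w + p0.1 * ov - 1 with ht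
  have htP : t ∈ P := by
    rw [hP]
    exact List.mem_map.mpr ⟨p0, List.mem_filter.mpr ⟨hp0e, by simpa using hp01⟩, rfl⟩
  have hiB : (L + t) ∉ P := by
    intro hc
    obtain ⟨q, hqe, hq1, hqv⟩ := hmem _ hc
    exact hp0no q hqe hq1 (by omega)
  have hiBpos : (L + t) ∉ positions := by
    intro hc
    apply hiB
    rw [hpos, PySem.List.mem_sorted, PySem.Set.mem_ofList] at hc
    simp only [List.mem_map, List.mem_filter, Bool.and_eq_true, beq_iff_eq,
      decide_eq_true_eq] at hc
    obtain ⟨p, ⟨hpe, hp1, _⟩, hv⟩ := hc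
    rw [hP]
    exact List.mem_map.mpr ⟨p, List.mem_filter.mpr ⟨hpe, by simpa using hp1⟩, hv⟩
  have hkt : ((L + t).toNat : Int) = L + t := by rcases hposb with ⟨h1', h2'⟩; omega
  intro hEq
  have hidx := congrArg (fun l => l[(L + t).toNat]?) hEq
  simp only [List.getElem?_map] at hidx
  have hrk : (PySem.List.pyRange 0 L 1)[(L + t).toNat]? = some (L + t) := by
    rw [PySem.List.getElem?_pyRange_one]
    rw [if_pos (by rcases hposb with ⟨h1', h2'⟩; omega)]
    rw [hkt]
    ring_nf
  rw [hrk] at hidx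
  simp only [Option.map_some] at hidx
  have hA : (if ∃ p ∈ P, pvWrap L p = L + t then (1 : Int) else 0) = 1 := by
    rw [if_pos ⟨t, htP, by unfold pvWrap; rw [if_pos (by omega)]⟩]
  have hB : (if (L + t) ∈ positions then (1 : Int) else 0) = 0 := by
    rw [if_neg hiBpos]
  rw [hA, hB] at hidx
  exact one_ne_zero (Option.some.inj hidx)

-- ===== VERDICT (by name: the statement is the Claim_ definition above) =====
theorem slidSHAPPos_to_tsPos_py_changed : Claim_changed_slidSHAPPos_to_tsPos_py := by
  unfold Claim_changed_slidSHAPPos_to_tsPos_py; decide
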